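-- pv_equiv track=rewrite | github.com/HackademicsForum/Cyprium | kernel/utils.py | base_autodetect
-- ===== SOURCE A (Python) =====
-- import string
--
-- BASE_DIGITS_ALLOWED = tuple((string.digits + string.ascii_lowercase))
--
-- def base_autodetect(text, n_digits, allowed_bases=(16, 10, 8, 2)):
--     """
--     Try to auto-detect base of cyphered text...
--     It determines the most probable base, that's all!
--     n_digits is a mapping of the number of digits per number, for each base
--     (e.g. typically 8, 16, 32, etc. for binary).
--     Note: bases must from higher to lower!
--     """
--     c_data = set(text)
--     ln_txt = len(text)
--     allowed_bases = list(allowed_bases) + [0]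
--     for idx, b in enumerate(allowed_bases):
--         if b > 36:
--             continue  # Max base (digits + ascii letters).
--         if b == 0:
--             break  # End of process (last 0 base is just used for code below).
--         b_spe = set(BASE_DIGITS_ALLOWED[allowed_bases[idx + 1]:b])
--         if b > 10:
--             # Add uppercase version of "digits".
--             b_spe |= {d.upper() for d in b_spe}
--         if b_spe & c_data:
--             if ln_txt % n_digits[b] == 0:
--                 return b  # Found a valid base.
--             # If length does not match, try a upper base.
--             for bb in allowed_bases[:idx]:
--                 if ln_txt % n_digits[bb] == 0:
--                     return bb  # Found a valid base.
--             # Else, return None!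
--             return None
-- ===== SOURCE B (Python) =====
-- import string
--
-- BASE_DIGITS_ALLOWED = tuple((string.digits + string.ascii_lowercase))
--
--
-- def base_autodetect(text, n_digits, allowed_bases=(16, 10, 8, 2)):
--     """Table-driven variant: build a char -> tier-index dict once (walking the
--     tiers from last to first so earlier, higher-priority tiers overwrite), then
--     a single scan over text keeps the smallest mapped tier index."""
--     bases = list(allowed_bases) + [0]
--     z = bases.index(0)
--     table = {}
--     for idx in range(z - 1, -1, -1):
--         b = bases[idx]
--         if b > 36:
--             continue
--         for c in BASE_DIGITS_ALLOWED[bases[idx + 1]:b]: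
--             table[c] = idx
--             if b > 10:
--                 table[c.upper()] = idx
--     best = None
--     for c in text:
--         i = table.get(c)
--         if i is not None and (best is None or i < best):
--             best = i
--     if best is None:
--         return None
--     b = bases[best]
--     if len(text) % n_digits[b] == 0:
--         return b
--     for bb in bases[:best]:
--         if len(text) % n_digits[bb] == 0:
--             return bb
--     return None
-- ===== Notes on version B (the rewrite author's own statement) =====
-- stated objective: alternative
-- what changed: Replaces A's per-tier scan (build each tier's character set and intersect it with set(text), walking tiers in priority order) by a single char->tier-index dict built once from last tier to first (earlier tiers overwrite, preserving list-order priority) followed by one pass over text keeping the smallest mapped index; the length-validation fallback is unchanged.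
import Mathlib
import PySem

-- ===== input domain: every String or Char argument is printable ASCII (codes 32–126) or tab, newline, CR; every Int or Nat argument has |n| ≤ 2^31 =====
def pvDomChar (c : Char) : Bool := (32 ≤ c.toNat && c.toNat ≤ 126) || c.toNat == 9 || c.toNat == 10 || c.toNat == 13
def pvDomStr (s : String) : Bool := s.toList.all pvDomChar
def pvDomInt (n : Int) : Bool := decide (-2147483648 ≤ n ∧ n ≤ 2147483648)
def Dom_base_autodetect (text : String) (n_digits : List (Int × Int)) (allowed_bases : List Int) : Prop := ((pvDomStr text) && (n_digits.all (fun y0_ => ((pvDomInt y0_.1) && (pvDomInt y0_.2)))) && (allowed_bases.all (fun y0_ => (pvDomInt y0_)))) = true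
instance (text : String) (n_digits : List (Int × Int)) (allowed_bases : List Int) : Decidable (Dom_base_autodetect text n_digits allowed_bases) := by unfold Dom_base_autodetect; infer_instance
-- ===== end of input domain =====

-- B replaces A's per-tier set building + intersection scan by one char->tier-index dict
-- built once (last tier to first, so higher-priority tiers overwrite) and a single pass
-- over text keeping the smallest mapped index; same validation fallback. Objective: alternative.

-- ===== PORT A =====
-- BASE_DIGITS_ALLOWED (module constant)
def pvDigits : List Char :=
  ['0','1','2','3','4','5','6','7','8','9','a','b','c','d','e','f','g','h','i','j','k','l','m',
   'n','o','p','q','r','s','t','u','v','w','x','y','z']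

-- n_digits[b]: dict lookup on the association list (first match, per the type convention)
def pvLookup (nd : List (Int × Int)) (k : Int) : Option Int :=
  (nd.find? (fun p => p.1 == k)).map (·.2)

-- 'for bb in allowed_bases[:idx]: if ln_txt % n_digits[bb] == 0: return bb' then 'return None'
-- (none on a missing key / zero divisor = Python's KeyError / ZeroDivisionError, outside Pre_)
def baFallbackA (lnTxt : Int) (nd : List (Int × Int)) : List Int → Option Int
  | [] => none
  | bb :: rest =>
    match pvLookup nd bb with
    | none => none
    | some v =>
      if v = 0 then none
      else if PySem.Int.mod lnTxt v = 0 then some bb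
      else baFallbackA lnTxt nd rest

-- b_spe = set(BASE_DIGITS_ALLOWED[allowed_bases[idx+1]:b]); if b > 10: b_spe |= uppercase
-- (the pyGet? default 0 is never used: when evaluated, idx+1 is in range — a 0 was appended)
def baTierA (bases : List Int) (idx : Nat) (b : Int) : PySem.Set Char :=
  let start := (PySem.List.pyGet? bases ((idx : Int) + 1)).getD 0
  let s : PySem.Set Char := PySem.Set.ofList (PySem.List.slice pvDigits (some start) (some b))
  if b > 10 then PySem.Set.union s (PySem.Set.ofList (s.map PySem.Chars.upperChar)) else s

-- 'for idx, b in enumerate(allowed_bases): …'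
def baLoopA (cData : PySem.Set Char) (lnTxt : Int) (nd : List (Int × Int)) (bases : List Int) :
    Nat → List Int → Option Int
  | _, [] => none
  | idx, b :: rest =>
    if b > 36 then baLoopA cData lnTxt nd bases (idx + 1) rest
    else if b = 0 then none
    else if (PySem.Set.inter (baTierA bases idx b) cData).isEmpty then
      baLoopA cData lnTxt nd bases (idx + 1) rest
    else
      match pvLookup nd b with
      | none => none
      | some v =>
        if v = 0 then none
        else if PySem.Int.mod lnTxt v = 0 then some b
        else baFallbackA lnTxt nd (PySem.List.slice bases none (some (idx : Int)))

def base_autodetect (text : String) (n_digits : List (Int × Int)) (allowed_bases : List Int) : Option Int :=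
  let cData : PySem.Set Char := PySem.Set.ofList text.toList
  let lnTxt := PySem.Str.len text
  let bases := allowed_bases ++ [0]
  baLoopA cData lnTxt n_digits bases 0 bases

-- ===== PORT B =====
-- one tier of the table build: 'for c in BASE_DIGITS_ALLOWED[bases[idx+1]:b]: table[c] = idx …'
def baStepB (bases : List Int) (table : PySem.Dict Char Int) (i : Int) : PySem.Dict Char Int :=
  if PySem.List.pyGetD bases i 0 > 36 then table
  else
    (PySem.List.slice pvDigits (some (PySem.List.pyGetD bases (i + 1) 0))
        (some (PySem.List.pyGetD bases i 0))).foldl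
      (fun t c =>
        if PySem.List.pyGetD bases i 0 > 10 then (t.insert c i).insert (PySem.Chars.upperChar c) i
        else t.insert c i) table

-- 'for idx in range(z - 1, -1, -1): …'
def baTableB (bases : List Int) (z : Int) : PySem.Dict Char Int :=
  (PySem.List.pyRange (z - 1) (-1) (-1)).foldl (baStepB bases) PySem.Dict.empty

-- 'best = None; for c in text: i = table.get(c); if i is not None and (best is None or i < best): best = i'
def baBestB (table : PySem.Dict Char Int) (cs : List Char) : Option Int :=
  cs.foldl (fun best c =>
    match table.get? c with
    | none => best
    | some i =>
      match best with
      | none => some i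
      | some bv => if i < bv then some i else best) none

-- 'for bb in bases[:best]: …' then 'return None' (same validation loop as in A's Python)
def baFallbackB (lnTxt : Int) (nd : List (Int × Int)) : List Int → Option Int
  | [] => none
  | bb :: rest =>
    match pvLookup nd bb with
    | none => none
    | some v =>
      if v = 0 then none
      else if PySem.Int.mod lnTxt v = 0 then some bb
      else baFallbackB lnTxt nd rest

def base_autodetect_alt (text : String) (n_digits : List (Int × Int)) (allowed_bases : List Int) : Option Int :=
  let bases := allowed_bases ++ [0]
  -- z = bases.index(0): always found, a 0 was just appended (the getD default is unreachable)
  let z : Nat := (PySem.List.index? bases 0).getD 0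
  let table := baTableB bases (z : Int)
  match baBestB table text.toList with
  | none => none
  | some bi =>
    let b := PySem.List.pyGetD bases bi 0
    match pvLookup n_digits b with
    | none => none
    | some v =>
      if v = 0 then none
      else if PySem.Int.mod (PySem.Str.len text) v = 0 then some b
      else baFallbackB (PySem.Str.len text) n_digits (PySem.List.slice bases none (some bi))

-- ===== PRECONDITION & SPEC =====
-- the characters of tier j, before the uppercase extension
def baChars (bases : List Int) (j : Nat) : List Char :=
  PySem.List.slice pvDigits (some (bases.getD (j + 1) 0)) (some (bases.getD j 0))

-- does any character of text hit tier j? (tier j's digits, plus their uppercase when base > 10)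
def baTierHitB (text : String) (bases : List Int) (j : Nat) : Bool :=
  decide (bases.getD j 0 ≤ 36) &&
  text.toList.any (fun c =>
    (baChars bases j).contains c ||
    (decide (10 < bases.getD j 0) &&
     (baChars bases j).any (fun d => c == PySem.Chars.upperChar d)))

-- Pre_ excludes EXACTLY the inputs on which A raises (a KeyError / ZeroDivisionError when
-- indexing n_digits at the first tier hit by a character of text, or at a consulted base of
-- the higher-base fallback loop); B raises there too, so nothing A returns on is excluded.
def Pre_base_autodetect (text : String) (n_digits : List (Int × Int)) (allowed_bases : List Int) : Prop :=
  (match (List.range ((PySem.List.index? (allowed_bases ++ [0]) (0 : Int)).getD 0)).find?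
      (baTierHitB text (allowed_bases ++ [0])) with
   | none => true
   | some j =>
     ((n_digits.find? (fun p => p.1 == (allowed_bases ++ [0]).getD j 0)).map (·.2)).getD 0 != 0 &&
     (PySem.Int.mod (PySem.Str.len text)
        (((n_digits.find? (fun p => p.1 == (allowed_bases ++ [0]).getD j 0)).map (·.2)).getD 0) == 0 ||
      (List.range j).all (fun k =>
        !((List.range k).all (fun k' =>
            !(((n_digits.find? (fun p => p.1 == (allowed_bases ++ [0]).getD k' 0)).map (·.2)).getD 0 != 0 &&
              (PySem.Int.mod (PySem.Str.len text)
                 (((n_digits.find? (fun p => p.1 == (allowed_bases ++ [0]).getD k' 0)).map (·.2)).getD 0) == 0)))) ||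
        ((n_digits.find? (fun p => p.1 == (allowed_bases ++ [0]).getD k 0)).map (·.2)).getD 0 != 0))) = true
instance (text : String) (n_digits : List (Int × Int)) (allowed_bases : List Int) : Decidable (Pre_base_autodetect text n_digits allowed_bases) := by unfold Pre_base_autodetect; infer_instance

def pvWitness_base_autodetect : String × (List (Int × Int)) × List Int :=
  ("", [((16 : Int), (2 : Int)), (10, 1), (8, 1), (2, 1)], [16, 10, 8, 2])

def Spec_base_autodetect (text : String) (n_digits : List (Int × Int)) (allowed_bases : List Int) (out : Option Int) : Prop := out = base_autodetect_alt text n_digits allowed_bases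
instance (text : String) (n_digits : List (Int × Int)) (allowed_bases : List Int) (out : Option Int) : Decidable (Spec_base_autodetect text n_digits allowed_bases out) := by unfold Spec_base_autodetect; infer_instance

-- ===== CLAIM (what is proved, stated in full; the proofs are below) =====
def Claim_equal_base_autodetect : Prop := ∀ (text : String) (n_digits : List (Int × Int)) (allowed_bases : List Int), Dom_base_autodetect text n_digits allowed_bases → Pre_base_autodetect text n_digits allowed_bases → Spec_base_autodetect text n_digits allowed_bases (base_autodetect text n_digits allowed_bases)

-- ===== LEMMAS AND PROOFS =====

-- 'character c hits tier j'
def baHit (bases : List Int) (j : Nat) (c : Char) : Prop :=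
  bases.getD j 0 ≤ 36 ∧
    (c ∈ baChars bases j ∨
      (10 < bases.getD j 0 ∧ ∃ d ∈ baChars bases j, c = PySem.Chars.upperChar d))

-- decidability of baHit, as a plain definition (not a registered instance)
def baHitD (bases : List Int) (j : Nat) (c : Char) : Decidable (baHit bases j c) := by
  unfold baHit; infer_instance

-- Bool forms of baHit used as find?/any predicates in the proofs
def baHitB (bases : List Int) (j : Nat) (c : Char) : Bool :=
  @decide (baHit bases j c) (baHitD bases j c)

def baAnyHitB (bases : List Int) (cs : List Char) (j : Nat) : Bool :=
  cs.any (fun c => baHitB bases j c)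

@[simp] theorem baHitB_eq_true (bases : List Int) (j : Nat) (c : Char) :
    baHitB bases j c = true ↔ baHit bases j c := by
  simp [baHitB]

@[simp] theorem baAnyHitB_eq_true (bases : List Int) (cs : List Char) (j : Nat) :
    baAnyHitB bases cs j = true ↔ ∃ c ∈ cs, baHit bases j c := by
  simp [baAnyHitB]


-- first tier in [k, z) hit by some character of cs
def baFirstHit (bases : List Int) (cs : List Char) (z k : Nat) : Option Nat :=
  (List.range' k (z - k)).find? (baAnyHitB bases cs)

-- the shared validation of a detected tier j
def baValidate (lnTxt : Int) (nd : List (Int × Int)) (bases : List Int) (j : Nat) : Option Int :=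
  match pvLookup nd (bases.getD j 0) with
  | none => none
  | some v =>
    if v = 0 then none
    else if PySem.Int.mod lnTxt v = 0 then some (bases.getD j 0)
    else baFallbackA lnTxt nd (bases.take j)

theorem baFallback_eq (lnTxt : Int) (nd : List (Int × Int)) (l : List Int) :
    baFallbackB lnTxt nd l = baFallbackA lnTxt nd l := by
  induction l with
  | nil => rfl
  | cons bb rest ih => simp [baFallbackA, baFallbackB, ih]

-- find? over an ascending range: characterizations
theorem range'_find?_eq_none_iff (p : Nat → Bool) (a n : Nat) :
    (List.range' a n).find? p = none ↔ ∀ i, a ≤ i → i < a + n → ¬ p i := by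
  rw [List.find?_eq_none]
  constructor
  · intro h i h1 h2 hp
    have hm : i ∈ List.range' a n := List.mem_range'.mpr ⟨i - a, by omega, by omega⟩
    exact absurd hp (by simpa using h i hm)
  · intro h x hx
    rw [List.mem_range'] at hx
    obtain ⟨k, hk, rfl⟩ := hx
    simpa using h (a + k) (by omega) (by omega)

theorem range'_find?_eq_some_iff (p : Nat → Bool) (a n j : Nat) :
    (List.range' a n).find? p = some j ↔
      (a ≤ j ∧ j < a + n ∧ p j ∧ ∀ i, a ≤ i → i < j → ¬ p i) := by
  induction n generalizing a with
  | zero =>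
    rw [List.range'_zero]
    simp only [List.find?_nil]
    constructor
    · intro h; cases h
    · rintro ⟨h1, h2, _⟩; omega
  | succ n ih =>
    rw [List.range'_succ]
    rcases Bool.eq_false_or_eq_true (p a) with hpa | hpa
    · rw [List.find?_cons_of_pos hpa]
      constructor
      · rintro h
        injection h with h; subst h
        exact ⟨le_refl _, by omega, hpa, fun i h1 h2 => by omega⟩
      · rintro ⟨h1, _, _, h4⟩
        by_contra hne
        have : a ≠ j := fun h => hne (by rw [h])
        exact h4 a (le_refl _) (by omega) hpa
    · rw [List.find?_cons_of_neg (by simp [hpa]), ih]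
      constructor
      · rintro ⟨h1, h2, h3, h4⟩
        refine ⟨by omega, by omega, h3, fun i hi1 hi2 => ?_⟩
        rcases Nat.eq_or_lt_of_le hi1 with rfl | h
        · simp [hpa]
        · exact h4 i h hi2
      · rintro ⟨h1, h2, h3, h4⟩
        have : a ≠ j := by rintro rfl; rw [h3] at hpa; cases hpa
        exact ⟨by omega, by omega, h3, fun i hi1 hi2 => h4 i (by omega) hi2⟩

-- membership in A's tier set, phrased via baChars
theorem mem_baTierA (bases : List Int) (j : Nat) (x : Char) :
    x ∈ baTierA bases j (bases.getD j 0) ↔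
      (x ∈ baChars bases j ∨
        (10 < bases.getD j 0 ∧ ∃ d ∈ baChars bases j, x = PySem.Chars.upperChar d)) := by
  unfold baTierA baChars
  have hidx : (PySem.List.pyGet? bases ((j : Int) + 1)).getD 0 = bases.getD (j + 1) 0 := by
    have h1 : ((j : Int) + 1) = ((j + 1 : Nat) : Int) := by push_cast; ring
    rw [h1, PySem.List.pyGet?_natCast, List.getD_eq_getElem?_getD]
  rw [hidx]
  by_cases hb : 10 < bases.getD j 0
  · rw [if_pos hb]
    simp only [PySem.Set.mem_union, PySem.Set.mem_ofList, List.mem_map]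
    constructor
    · rintro (h | ⟨d, hd, hx⟩)
      · exact Or.inl h
      · exact Or.inr ⟨hb, d, hd, hx.symm⟩
    · rintro (h | ⟨_, d, hd, hx⟩)
      · exact Or.inl h
      · exact Or.inr ⟨d, hd, hx.symm⟩
  · rw [if_neg hb]
    rw [PySem.Set.mem_ofList]
    constructor
    · exact Or.inl
    · rintro (h | ⟨hb', _⟩)
      · exact h
      · exact absurd hb' hb

-- the loop guard 'if b_spe & c_data:' via baHit
theorem baTierA_inter_isEmpty (bases : List Int) (cs : List Char) (j : Nat)
    (hb : bases.getD j 0 ≤ 36) :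
    (PySem.Set.inter (baTierA bases j (bases.getD j 0)) (PySem.Set.ofList cs)).isEmpty = true ↔
      ¬ ∃ c ∈ cs, baHit bases j c := by
  rw [List.isEmpty_iff, List.eq_nil_iff_forall_not_mem]
  unfold baHit
  constructor
  · rintro h ⟨c, hc, _, hcond⟩
    exact h c (by
      rw [PySem.Set.mem_inter, mem_baTierA, PySem.Set.mem_ofList]
      exact ⟨hcond, hc⟩)
  · intro h x hx
    rw [PySem.Set.mem_inter, mem_baTierA, PySem.Set.mem_ofList] at hx
    exact h ⟨x, hx.2, hb, hx.1⟩

-- A's loop finds the first hit tier, then validates it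
theorem baLoopA_eq (cs : List Char) (ln : Int) (nd : List (Int × Int)) (bases : List Int)
    (z : Nat) (hz : PySem.List.index? bases 0 = some z) :
    ∀ n k, k ≤ z → z - k = n →
      baLoopA (PySem.Set.ofList cs) ln nd bases k (bases.drop k) =
        (match baFirstHit bases cs z k with
         | none => none
         | some j => baValidate ln nd bases j) := by
  obtain ⟨hzlen, hz0, hzfirst⟩ := PySem.List.getElem_of_index?_eq_some hz
  intro n
  induction n with
  | zero =>
    intro k hk hnk
    have hkz : k = z := by omega
    subst hkz
    rw [List.drop_eq_getElem_cons hzlen, hz0]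
    unfold baLoopA baFirstHit
    rw [if_neg (by norm_num), if_pos rfl, Nat.sub_self, List.range'_zero, List.find?_nil]
  | succ n ih =>
    intro k hk hnk
    have hklen : k < bases.length := by omega
    have hkne : bases[k] ≠ 0 := hzfirst k (by omega)
    have hgetD : bases.getD k 0 = bases[k] := List.getD_eq_getElem bases 0 hklen
    rw [List.drop_eq_getElem_cons hklen]
    have hrange : List.range' k (z - k) = k :: List.range' (k + 1) (z - (k + 1)) := by
      have h1 : z - k = (z - (k + 1)) + 1 := by omega
      rw [h1, List.range'_succ]
    unfold baLoopA
    by_cases h36 : bases[k] > 36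
    · rw [if_pos h36]
      have hnohit : baAnyHitB bases cs k = false := by
        rw [Bool.eq_false_iff, Ne, baAnyHitB_eq_true]
        rintro ⟨c, _, hle, _⟩
        rw [hgetD] at hle; omega
      rw [ih k.succ (by omega) (by omega)]
      unfold baFirstHit
      rw [hrange, List.find?_cons_of_neg (by simp [hnohit])]
    · rw [if_neg h36, if_neg hkne]
      by_cases hemp :
          (PySem.Set.inter (baTierA bases k bases[k]) (PySem.Set.ofList cs)).isEmpty = true
      · rw [if_pos hemp]
        have hnohit : baAnyHitB bases cs k = false := by
          rw [Bool.eq_false_iff, Ne, baAnyHitB_eq_true]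
          rw [← hgetD] at hemp
          exact (baTierA_inter_isEmpty bases cs k (by omega)).mp hemp
        rw [ih k.succ (by omega) (by omega)]
        unfold baFirstHit
        rw [hrange, List.find?_cons_of_neg (by simp [hnohit])]
      · rw [if_neg hemp]
        have hhit : baAnyHitB bases cs k = true := by
          rw [baAnyHitB_eq_true]
          by_contra hno
          rw [← hgetD] at hemp
          exact hemp ((baTierA_inter_isEmpty bases cs k (by omega)).mpr hno)
        have hfh : baFirstHit bases cs z k = some k := by
          unfold baFirstHit
          rw [hrange]
          exact List.find?_cons_of_pos (by simpa using hhit)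
        rw [hfh]
        have hval : baValidate ln nd bases k =
            (match pvLookup nd bases[k] with
             | none => none
             | some v =>
               if v = 0 then none
               else if PySem.Int.mod ln v = 0 then some bases[k]
               else baFallbackA ln nd (PySem.List.slice bases none (some (k : Int)))) := by
          unfold baValidate
          rw [hgetD, PySem.List.slice_to_natCast]
        exact hval.symm

-- one tier's insertions, as a lookup
theorem baInsChars_get? (b i : Int) (chars : List Char) (d : PySem.Dict Char Int) (c : Char) :
    (chars.foldl
      (fun t x =>
        if b > 10 then (t.insert x i).insert (PySem.Chars.upperChar x) i
        else t.insert x i) d).get? c =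
      if c ∈ chars ∨ (10 < b ∧ ∃ e ∈ chars, c = PySem.Chars.upperChar e) then some i
      else d.get? c := by
  induction chars generalizing d with
  | nil => simp
  | cons x l ih =>
    rw [List.foldl_cons, ih]
    by_cases h1 : c ∈ l ∨ (10 < b ∧ ∃ e ∈ l, c = PySem.Chars.upperChar e)
    · rw [if_pos h1, if_pos (by
        rcases h1 with h | ⟨hb, e, he, hce⟩
        · exact Or.inl (List.mem_cons.mpr (Or.inr h))
        · exact Or.inr ⟨hb, e, List.mem_cons.mpr (Or.inr he), hce⟩)]
    · rw [if_neg h1]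
      have hfx : (if b > 10 then (d.insert x i).insert (PySem.Chars.upperChar x) i
            else d.insert x i).get? c =
          if c = x ∨ (10 < b ∧ c = PySem.Chars.upperChar x) then some i else d.get? c := by
        by_cases hb : (10 : Int) < b
        · rw [if_pos hb, PySem.Dict.get?_insert, PySem.Dict.get?_insert]
          by_cases hcu : c = PySem.Chars.upperChar x
          · rw [if_pos hcu, if_pos (Or.inr ⟨hb, hcu⟩)]
          · rw [if_neg hcu]
            by_cases hcx : c = x
            · rw [if_pos hcx, if_pos (Or.inl hcx)]
            · rw [if_neg hcx, if_neg (by rintro (h | ⟨_, h⟩); exacts [hcx h, hcu h])]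
        · rw [if_neg hb, PySem.Dict.get?_insert]
          by_cases hcx : c = x
          · rw [if_pos hcx, if_pos (Or.inl hcx)]
          · rw [if_neg hcx, if_neg (by rintro (h | ⟨hb', _⟩); exacts [hcx h, hb hb'])]
      rw [hfx]
      by_cases hx : c = x ∨ (10 < b ∧ c = PySem.Chars.upperChar x)
      · rw [if_pos hx, if_pos (by
          rcases hx with h | ⟨hb, h⟩
          · exact Or.inl (List.mem_cons.mpr (Or.inl h))
          · exact Or.inr ⟨hb, x, List.mem_cons.mpr (Or.inl rfl), h⟩)]
      · rw [if_neg hx, if_neg (by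
          rintro (h | ⟨hb, e, he, hce⟩)
          · rcases List.mem_cons.mp h with h | h
            exacts [hx (Or.inl h), h1 (Or.inl h)]
          · rcases List.mem_cons.mp he with rfl | h
            exacts [hx (Or.inr ⟨hb, hce⟩), h1 (Or.inr ⟨hb, e, h, hce⟩)])]

-- one baStepB step, as a lookup
theorem baStepB_get? (bases : List Int) (d : PySem.Dict Char Int) (k : Nat) (c : Char) :
    (baStepB bases d (k : Int)).get? c =
      @ite _ (baHit bases k c) (baHitD bases k c) (some ((k : Nat) : Int)) (d.get? c) := by
  unfold baStepB
  have h1 : PySem.List.pyGetD bases ((k : Int)) 0 = bases.getD k 0 :=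
    PySem.List.pyGetD_natCast bases k 0
  have h2 : PySem.List.pyGetD bases ((k : Int) + 1) 0 = bases.getD (k + 1) 0 := by
    have hc : ((k : Int) + 1) = ((k + 1 : Nat) : Int) := by push_cast; ring
    rw [hc, PySem.List.pyGetD_natCast]
  rw [h1, h2]
  by_cases h36 : bases.getD k 0 > 36
  · rw [if_pos h36, if_neg (by rintro ⟨hle, _⟩; omega)]
  · rw [if_neg h36, baInsChars_get?]
    unfold baHit baChars
    by_cases hc : c ∈ PySem.List.slice pvDigits (some (bases.getD (k + 1) 0)) (some (bases.getD k 0)) ∨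
        (10 < bases.getD k 0 ∧
          ∃ e ∈ PySem.List.slice pvDigits (some (bases.getD (k + 1) 0)) (some (bases.getD k 0)),
            c = PySem.Chars.upperChar e)
    · rw [if_pos hc, if_pos ⟨by omega, hc⟩]
    · rw [if_neg hc, if_neg (by rintro ⟨_, h⟩; exact hc h)]

-- the whole table build, as a lookup: later-processed (higher-priority) tiers overwrite
theorem baTableB_get? (bases : List Int) (c : Char) :
    ∀ (k : Nat) (d : PySem.Dict Char Int),
      ((PySem.List.pyRange (((k : Nat) : Int) - 1) (-1) (-1)).foldl (baStepB bases) d).get? c =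
        (match (List.range' 0 k).find? (fun j => baHitB bases j c) with
         | some j => some ((j : Nat) : Int)
         | none => d.get? c) := by
  intro k
  induction k with
  | zero =>
    intro d
    rw [show ((0 : Nat) : Int) - 1 = -1 by norm_num,
      PySem.List.pyRange_neg_one_eq_nil (le_refl _), List.range'_zero]
    simp
  | succ k ih =>
    intro d
    have hcons : PySem.List.pyRange (((k + 1 : Nat) : Int) - 1) (-1) (-1) =
        ((k : Nat) : Int) :: PySem.List.pyRange (((k : Nat) : Int) - 1) (-1) (-1) := by
      have hc : (((k + 1 : Nat) : Int) - 1) = ((k : Nat) : Int) := by push_cast; ring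
      rw [hc, PySem.List.pyRange_neg_one_cons (by omega)]
    rw [hcons, List.foldl_cons, ih, baStepB_get?]
    cases hf : (List.range' 0 k).find? (fun j => baHitB bases j c) with
    | some j =>
      dsimp only
      obtain ⟨h1, h2, h3, h4⟩ := (range'_find?_eq_some_iff _ 0 k j).mp hf
      rw [(range'_find?_eq_some_iff _ 0 (k + 1) j).mpr ⟨h1, by omega, h3, h4⟩]
    | none =>
      dsimp only
      have hnone := (range'_find?_eq_none_iff _ 0 k).mp hf
      by_cases hk : baHit bases k c
      · have hs : (List.range' 0 (k + 1)).find? (fun j => baHitB bases j c) = some k :=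
          (range'_find?_eq_some_iff _ 0 (k + 1) k).mpr
            ⟨by omega, by omega, by simpa using hk, fun i h1 h2 => hnone i h1 (by omega)⟩
        rw [if_pos hk, hs]
      · have hn : (List.range' 0 (k + 1)).find? (fun j => baHitB bases j c) = none := by
          refine (range'_find?_eq_none_iff _ 0 (k + 1)).mpr (fun i h1 h2 => ?_)
          rcases Nat.lt_or_ge i k with h | h
          · exact hnone i h1 (by omega)
          · have hik : i = k := by omega
            subst hik
            simpa using hk
        rw [if_neg hk, hn]

-- B's text scan is the minimum of the looked-up values
theorem baBestB_eq_min? (tbl : PySem.Dict Char Int) (cs : List Char) :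
    ∀ acc : Option Int,
      cs.foldl (fun best c =>
        match tbl.get? c with
        | none => best
        | some i =>
          match best with
          | none => some i
          | some bv => if i < bv then some i else best) acc =
      (acc.toList ++ cs.filterMap tbl.get?).min? := by
  induction cs with
  | nil => intro acc; cases acc <;> simp
  | cons c l ih =>
    intro acc
    rw [List.foldl_cons]
    cases hg : tbl.get? c with
    | none =>
      rw [List.filterMap_cons_none hg]
      have := ih acc
      exact this
    | some i =>
      rw [List.filterMap_cons_some hg]
      cases acc with
      | none =>
        have := ih (some i)
        simpa using this
      | some b =>
        have hpush : (if i < b then some i else some b) = some (if i < b then i else b) := by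
          split_ifs <;> rfl
        have := ih (some (if i < b then i else b))
        simp only [hg]
        rw [hpush, this]
        simp only [Option.toList_some, List.cons_append,
          List.nil_append, List.min?_cons', List.foldl_cons]
        have hmin : (if i < b then i else b) = min b i := by
          rw [min_def]; split_ifs <;> omega
        rw [hmin]

-- B's detection equals the first hit tier
theorem baBestB_tableB (bases : List Int) (cs : List Char) (z : Nat) :
    baBestB (baTableB bases ((z : Nat) : Int)) cs =
      (baFirstHit bases cs z 0).map (fun j => ((j : Nat) : Int)) := by
  have htbl : ∀ c, (baTableB bases ((z : Nat) : Int)).get? c =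
      (match (List.range' 0 z).find? (fun j => baHitB bases j c) with
       | some j => some ((j : Nat) : Int)
       | none => none) := by
    intro c
    unfold baTableB
    rw [baTableB_get? bases c z PySem.Dict.empty, PySem.Dict.get?_empty]
  unfold baBestB baFirstHit
  rw [baBestB_eq_min? (baTableB bases ((z : Nat) : Int)) cs none]
  simp only [Option.toList_none, List.nil_append]
  cases hfh : (List.range' 0 z).find? (baAnyHitB bases cs) with
  | none =>
    have hnone := (range'_find?_eq_none_iff _ 0 z).mp hfh
    have hempty : cs.filterMap (baTableB bases ((z : Nat) : Int)).get? = [] := by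
      rw [List.filterMap_eq_nil_iff]
      intro c hc
      rw [htbl c]
      have hp2 : ∀ i, 0 ≤ i → i < 0 + z → ¬ ((fun j => baHitB bases j c) i = true) :=
        fun i h1 h2 hp => hnone i h1 h2 ((baAnyHitB_eq_true bases cs i).mpr
          ⟨c, hc, (baHitB_eq_true bases i c).mp hp⟩)
      rw [(range'_find?_eq_none_iff _ 0 z).mpr hp2]
    rw [hempty]
    simp
  | some j =>
    obtain ⟨h1, h2, h3, h4⟩ := (range'_find?_eq_some_iff _ 0 z j).mp hfh
    obtain ⟨c0, hc0, hhit0⟩ := (baAnyHitB_eq_true bases cs j).mp h3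
    simp only [Option.map_some]
    rw [List.min?_eq_some_iff]
    constructor
    · rw [List.mem_filterMap]
      refine ⟨c0, hc0, ?_⟩
      rw [htbl c0]
      rw [(range'_find?_eq_some_iff _ 0 z j).mpr
        ⟨h1, h2, (baHitB_eq_true bases j c0).mpr hhit0, fun i hi1 hi2 hp =>
          (h4 i hi1 hi2) ((baAnyHitB_eq_true bases cs i).mpr
            ⟨c0, hc0, (baHitB_eq_true bases i c0).mp hp⟩)⟩]
    · intro v hv
      rw [List.mem_filterMap] at hv
      obtain ⟨c, hc, hgc⟩ := hv
      rw [htbl c] at hgc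
      cases hfc : (List.range' 0 z).find? (fun j => baHitB bases j c) with
      | none => rw [hfc] at hgc; cases hgc
      | some j' =>
        rw [hfc] at hgc
        injection hgc with hgc
        subst hgc
        obtain ⟨g1, g2, g3, _⟩ := (range'_find?_eq_some_iff _ 0 z j').mp hfc
        have hjj : j ≤ j' := by
          by_contra hlt
          have hw : baAnyHitB bases cs j' = true :=
            (baAnyHitB_eq_true bases cs j').mpr ⟨c, hc, (baHitB_eq_true bases j' c).mp g3⟩
          exact (h4 j' g1 (by omega)) hw
        exact_mod_cast hjj

-- the two ports agree on every input
theorem ports_eq (text : String) (nd : List (Int × Int)) (ab : List Int) :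
    base_autodetect text nd ab = base_autodetect_alt text nd ab := by
  simp only [base_autodetect, base_autodetect_alt]
  obtain ⟨z, hz⟩ := Option.isSome_iff_exists.mp
    (Iff.mpr (PySem.List.index?_isSome_iff (ab ++ [0]) (0 : Int)) (by simp))
  rw [hz]
  simp only [Option.getD_some]
  have hloop := baLoopA_eq text.toList (PySem.Str.len text) nd (ab ++ [0]) z hz (z - 0) 0 (by
      obtain ⟨hzlen, _, _⟩ := PySem.List.getElem_of_index?_eq_some hz
      omega) rfl
  rw [List.drop_zero] at hloop
  rw [hloop, baBestB_tableB (ab ++ [0]) text.toList z]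
  cases hfh : baFirstHit (ab ++ [0]) text.toList z 0 with
  | none => rfl
  | some j =>
    simp only [Option.map_some]
    unfold baValidate
    rw [PySem.List.pyGetD_natCast, baFallback_eq, PySem.List.slice_to_natCast]

-- ===== VERDICT (by name: the statement is the Claim_ definition above) =====
theorem base_autodetect_spec : Claim_equal_base_autodetect := by
  intro text n_digits allowed_bases _ _
  unfold Spec_base_autodetect
  exact ports_eq text n_digits allowed_bases
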